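-- pv_equiv track=rewrite | github.com/Gowri-Krishnamoorthi/python_dsa | 115_56_Number_Series.py | generate_5_6_series
-- ===== SOURCE A (Python) =====
-- from collections import deque
--
-- def generate_5_6_series(n):
--     result = []
--     q = deque()
--     q.append("5")
--     q.append("6")
--
--     while len(result) < n:
--         curr = q.popleft()
--         result.append(curr)
--         q.append(curr + "5")
--         q.append(curr + "6")
--
--     return result
-- ===== SOURCE B (Python) =====
-- def generate_5_6_series(n):
--     result = []
--     i = 0
--     while len(result) < n:
--         s = bin(i + 2)[3:]
--         result.append(''.join('5' if c == '0' else '6' for c in s))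
--         i += 1
--     return result
-- ===== Notes on version B (the rewrite author's own statement) =====
-- stated objective: alternative
-- what changed: Replaces the BFS deque expansion with a direct closed-form of the i-th element (binary of i+2 without its leading 1, digits mapped 0->5/1->6), so no queue is maintained at all.
import Mathlib
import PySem

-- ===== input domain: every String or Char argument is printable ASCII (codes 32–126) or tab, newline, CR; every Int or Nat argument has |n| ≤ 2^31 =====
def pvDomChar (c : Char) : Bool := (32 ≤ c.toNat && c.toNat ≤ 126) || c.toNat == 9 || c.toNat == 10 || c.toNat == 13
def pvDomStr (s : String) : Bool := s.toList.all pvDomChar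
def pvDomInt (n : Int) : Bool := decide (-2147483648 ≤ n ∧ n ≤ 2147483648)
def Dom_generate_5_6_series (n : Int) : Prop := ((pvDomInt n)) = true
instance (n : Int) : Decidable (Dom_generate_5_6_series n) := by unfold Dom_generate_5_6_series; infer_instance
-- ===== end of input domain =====

-- B replaces A's BFS deque with a direct per-index formula (binary of i+2 mapped to 5/6); alternative decomposition, same cost.


-- ===== PORT A =====
-- A's while loop: strings kept as their List Char data (Python string concat is exact list append on the char data).
-- The [] queue case mirrors deque.popleft on an empty deque (IndexError); starting from the 2-element queue, the
-- queue grows each step and is never empty, so this branch is unreachable.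
def pvALoop (n : Int) (q : List (List Char)) (res : List String) : List String :=
  if _h : (res.length : Int) < n then
    match q with
    | [] => res
    | curr :: qs =>
        pvALoop n (qs ++ [curr ++ ['5'], curr ++ ['6']]) (res ++ [String.ofList curr])
  else res
termination_by (n - res.length).toNat
decreasing_by simp; omega

def generate_5_6_series (n : Int) : List String := pvALoop n [['5'], ['6']] []

-- ===== PORT B =====
-- bin(m) without the '0b' prefix, for m ≥ 1 (B only applies it to i+2 ≥ 2)
def pvBinChars : Nat → List Char
  | 0 => []
  | m + 1 => pvBinChars ((m + 1) / 2) ++ [if (m + 1) % 2 = 1 then '1' else '0']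
decreasing_by omega

-- bin(i+2)[3:] with '0'->'5', '1'->'6'
def pvElem (i : Nat) : String :=
  String.ofList (((pvBinChars (i + 2)).drop 1).map (fun c => if c = '0' then '5' else '6'))

def pvBLoop (n : Int) (i : Nat) (res : List String) : List String :=
  if (res.length : Int) < n then pvBLoop n (i + 1) (res ++ [pvElem i]) else res
termination_by (n - res.length).toNat
decreasing_by simp; omega

def generate_5_6_series_alt (n : Int) : List String := pvBLoop n 0 []

-- ===== PRECONDITION & SPEC =====
def Spec_generate_5_6_series (n : Int) (out : List String) : Prop := out = generate_5_6_series_alt n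
instance (n : Int) (out : List String) : Decidable (Spec_generate_5_6_series n out) := by unfold Spec_generate_5_6_series; infer_instance

-- ===== CLAIM (what is proved, stated in full; the proofs are below) =====
def Claim_equal_generate_5_6_series : Prop := ∀ (n : Int), Dom_generate_5_6_series n → Spec_generate_5_6_series n (generate_5_6_series n)

-- ===== LEMMAS AND PROOFS =====

-- the char data of B's i-th element, as a function of m = i + 2
def pvG (m : Nat) : List Char :=
  ((pvBinChars m).drop 1).map (fun c => if c = '0' then '5' else '6')

lemma pvBinChars_ne_nil (m : Nat) (h : 1 ≤ m) : pvBinChars m ≠ [] := by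
  match m, h with
  | m + 1, _ => simp [pvBinChars]

lemma pvBinChars_two_mul (m : Nat) (h : 1 ≤ m) :
    pvBinChars (2 * m) = pvBinChars m ++ ['0'] := by
  match m, h with
  | m + 1, _ =>
    have : 2 * (m + 1) = (2 * m + 1) + 1 := by ring
    rw [this, pvBinChars]
    have h2 : (2 * m + 1 + 1) / 2 = m + 1 := by omega
    have h3 : (2 * m + 1 + 1) % 2 = 0 := by omega
    simp [h2, h3]

lemma pvBinChars_two_mul_add_one (m : Nat) :
    pvBinChars (2 * m + 1) = pvBinChars m ++ ['1'] := by
  rw [pvBinChars]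
  have h2 : (2 * m + 1) / 2 = m := by omega
  have h3 : (2 * m + 1) % 2 = 1 := by omega
  simp [h2, h3]

lemma pvG_two_mul (m : Nat) (h : 1 ≤ m) : pvG (2 * m) = pvG m ++ ['5'] := by
  have hne := pvBinChars_ne_nil m h
  have hlen : 1 ≤ (pvBinChars m).length := by
    cases hl : pvBinChars m with
    | nil => exact absurd hl hne
    | cons a l => simp
  simp [pvG, pvBinChars_two_mul m h, List.drop_append_of_le_length hlen]

lemma pvG_two_mul_add_one (m : Nat) (h : 1 ≤ m) : pvG (2 * m + 1) = pvG m ++ ['6'] := by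
  have hne := pvBinChars_ne_nil m h
  have hlen : 1 ≤ (pvBinChars m).length := by
    cases hl : pvBinChars m with
    | nil => exact absurd hl hne
    | cons a l => simp
  simp [pvG, pvBinChars_two_mul_add_one m, List.drop_append_of_le_length hlen]

lemma pvElem_eq (i : Nat) : pvElem i = String.ofList (pvG (i + 2)) := rfl

-- B's loop produces the closed-form tail
lemma pvBLoop_eq (k : Nat) : ∀ (n : Int) (i : Nat) (res : List String),
    k = (n - res.length).toNat →
    pvBLoop n i res = res ++ (List.range k).map (fun j => pvElem (i + j)) := by
  induction k with
  | zero =>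
    intro n i res hk
    rw [pvBLoop]
    have : ¬ ((res.length : Int) < n) := by omega
    simp [this]
  | succ k ih =>
    intro n i res hk
    have hlt : (res.length : Int) < n := by omega
    rw [pvBLoop]
    simp only [hlt, if_true]
    rw [ih n (i + 1) (res ++ [pvElem i]) (by simp; omega)]
    rw [List.range_succ_eq_map]
    simp [List.append_assoc, Function.comp]
    intro a _; congr 1; omega

-- A's loop invariant: when the queue holds the elements with indices i .. 2i+1 (i = res.length),
-- the loop extends res by exactly the closed-form elements
lemma pvALoop_stop (n : Int) (q : List (List Char)) (res : List String)
    (h : ¬ ((res.length : Int) < n)) : pvALoop n q res = res := by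
  rw [pvALoop.eq_def]; simp [h]

lemma pvALoop_cons (n : Int) (curr : List Char) (qs : List (List Char)) (res : List String)
    (h : (res.length : Int) < n) :
    pvALoop n (curr :: qs) res
      = pvALoop n (qs ++ [curr ++ ['5'], curr ++ ['6']]) (res ++ [String.ofList curr]) := by
  rw [pvALoop.eq_def]; simp [h]

lemma pvALoop_eq (k : Nat) : ∀ (n : Int) (i : Nat) (res : List String),
    res.length = i → k = (n - i).toNat →
    pvALoop n ((List.range (i + 2)).map (fun j => pvG (i + j + 2))) res
      = res ++ (List.range k).map (fun j => pvElem (i + j)) := by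
  induction k with
  | zero =>
    intro n i res hres hk
    simpa using pvALoop_stop n _ res (by omega)
  | succ k ih =>
    intro n i res hres hk
    have hlt : (res.length : Int) < n := by omega
    -- split off the queue head: element of index i
    have hq : (List.range (i + 2)).map (fun j => pvG (i + j + 2))
        = pvG (i + 2) :: (List.range (i + 1)).map (fun j => pvG ((i + 1) + j + 2)) := by
      rw [List.range_succ_eq_map]
      simp [Function.comp]
      intro a _; congr 1; omega
    -- the two pushed strings are the elements of indices 2i+2 and 2i+3
    have h5 : pvG (i + 2) ++ ['5'] = pvG ((i + 1) + (i + 1) + 2) := by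
      have : (i + 1) + (i + 1) + 2 = 2 * (i + 2) := by ring
      rw [this, pvG_two_mul (i + 2) (by omega)]
    have h6 : pvG (i + 2) ++ ['6'] = pvG ((i + 1) + (i + 2) + 2) := by
      have : (i + 1) + (i + 2) + 2 = 2 * (i + 2) + 1 := by ring
      rw [this, pvG_two_mul_add_one (i + 2) (by omega)]
    have hq' : (List.range (i + 1)).map (fun j => pvG ((i + 1) + j + 2))
          ++ [pvG (i + 2) ++ ['5'], pvG (i + 2) ++ ['6']]
        = (List.range ((i + 1) + 2)).map (fun j => pvG ((i + 1) + j + 2)) := by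
      rw [h5, h6, show (i + 1) + 2 = ((i + 1) + 1) + 1 from rfl, List.range_succ,
          List.range_succ]
      simp [List.range_succ]
    rw [hq, pvALoop_cons n _ _ res hlt, hq',
        ih n (i + 1) (res ++ [String.ofList (pvG (i + 2))]) (by simp [hres]) (by omega)]
    rw [List.range_succ_eq_map]
    simp [List.append_assoc, Function.comp, pvElem_eq]
    intro a _; congr 2; omega

lemma pvBinChars_one : pvBinChars 1 = ['1'] := by
  rw [pvBinChars.eq_def]; norm_num; rw [pvBinChars.eq_def]

lemma init_queue : [['5'], ['6']] = (List.range (0 + 2)).map (fun j => pvG (0 + j + 2)) := by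
  have h2 : pvG 2 = ['5'] := by
    have : (2 : Nat) = 2 * 1 := rfl
    rw [pvG, this, pvBinChars_two_mul 1 (by omega), pvBinChars_one]
    simp
  have h3 : pvG 3 = ['6'] := by
    have : (3 : Nat) = 2 * 1 + 1 := rfl
    rw [pvG, this, pvBinChars_two_mul_add_one 1, pvBinChars_one]
    simp
  simp [List.range_succ, h2, h3]

-- ===== VERDICT (by name: the statement is the Claim_ definition above) =====
theorem generate_5_6_series_spec : Claim_equal_generate_5_6_series := by
  intro n _
  unfold Spec_generate_5_6_series generate_5_6_series generate_5_6_series_alt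
  rw [init_queue, pvALoop_eq ((n - 0).toNat) n 0 [] rfl (by simp),
      pvBLoop_eq ((n - 0).toNat) n 0 [] (by simp)]
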